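-- pv_equiv track=rewrite | github.com/Youkin06/KamoRogue | AbilitySelectScene.py | get_text_width
-- ===== SOURCE A (Python) =====
-- def get_text_width(text):
--     width = 0
--     for char in text:
--         if ord(char) < 256:
--             width += 4
--         else:
--             width += 8
--     return width
-- ===== SOURCE B (Python) =====
-- def get_text_width(text):
--     # Divide and conquer: split the string in half recursively; a single
--     # character is 4 units if narrow (ord < 256) and 8 if wide.
--     if len(text) <= 1:
--         return 0 if not text else (4 if ord(text) < 256 else 8)
--     mid = len(text) // 2
--     return get_text_width(text[:mid]) + get_text_width(text[mid:])
-- ===== Notes on version B (the rewrite author's own statement) =====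
-- stated objective: alternative
-- what changed: Replaces the left-to-right add-with-branch accumulator loop by a divide-and-conquer recursion that splits the string in half and sums the widths of the two halves, with single characters as the base case.
import Mathlib
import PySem

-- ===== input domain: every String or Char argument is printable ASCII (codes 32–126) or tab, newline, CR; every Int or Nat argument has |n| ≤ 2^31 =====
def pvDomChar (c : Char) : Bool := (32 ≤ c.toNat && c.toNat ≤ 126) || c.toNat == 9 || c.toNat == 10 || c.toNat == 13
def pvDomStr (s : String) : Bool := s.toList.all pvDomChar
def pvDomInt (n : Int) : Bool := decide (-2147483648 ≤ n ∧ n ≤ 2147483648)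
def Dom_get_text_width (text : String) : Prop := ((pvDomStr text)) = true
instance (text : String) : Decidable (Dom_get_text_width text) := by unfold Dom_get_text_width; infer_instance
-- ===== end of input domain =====

-- B replaces the accumulator loop by a divide-and-conquer recursion on halves (alternative decomposition, same result).

-- ===== PORT A =====
def get_text_width (text : String) : Int :=
  text.toList.foldl (fun width char =>
    if char.toNat < 256 then width + 4 else width + 8) 0

-- ===== PORT B =====
-- text[:mid] / text[mid:] with 0 ≤ mid ≤ len are exactly List.take / List.drop mid.
def gtwGo : List Char → Int
  | [] => 0
  | [c] => if c.toNat < 256 then 4 else 8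
  | a :: b :: rest =>
    let l := a :: b :: rest
    gtwGo (l.take (l.length / 2)) + gtwGo (l.drop (l.length / 2))
termination_by l => l.length
decreasing_by
  · simp [List.length_take]; omega
  · simp; omega

def get_text_width_alt (text : String) : Int := gtwGo text.toList

-- ===== PRECONDITION & SPEC =====
def Spec_get_text_width (text : String) (out : Int) : Prop := out = get_text_width_alt text
instance (text : String) (out : Int) : Decidable (Spec_get_text_width text out) := by unfold Spec_get_text_width; infer_instance

-- ===== CLAIM (what is proved, stated in full; the proofs are below) =====
def Claim_equal_get_text_width : Prop := ∀ (text : String), Dom_get_text_width text → Spec_get_text_width text (get_text_width text)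

-- ===== LEMMAS AND PROOFS =====

def gtwChar (c : Char) : Int := if c.toNat < 256 then 4 else 8

lemma foldl_eq_sum (l : List Char) (w : Int) :
    l.foldl (fun width char => if char.toNat < 256 then width + 4 else width + 8) w
      = w + (l.map gtwChar).sum := by
  induction l generalizing w with
  | nil => simp
  | cons c t ih =>
    simp only [List.foldl_cons, List.map_cons, List.sum_cons, ih, gtwChar]
    split_ifs <;> ring

lemma gtwGo_eq_sum : ∀ (l : List Char), gtwGo l = (l.map gtwChar).sum
  | [] => by simp [gtwGo]
  | [c] => by simp [gtwGo, gtwChar]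
  | a :: b :: rest => by
    have h1 := gtwGo_eq_sum ((a :: b :: rest).take ((a :: b :: rest).length / 2))
    have h2 := gtwGo_eq_sum ((a :: b :: rest).drop ((a :: b :: rest).length / 2))
    rw [gtwGo]
    rw [h1, h2, ← List.sum_append, ← List.map_append, List.take_append_drop]
termination_by l => l.length
decreasing_by
  · simp [List.length_take]; omega
  · simp; omega

-- ===== VERDICT (by name: the statement is the Claim_ definition above) =====
theorem get_text_width_spec : Claim_equal_get_text_width := by
  intro text _
  unfold Spec_get_text_width get_text_width get_text_width_alt
  rw [foldl_eq_sum, gtwGo_eq_sum]; ring
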